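-- pv_equiv track=rewrite | github.com/baluMallisetty/DemoLLMswithWeights | startLLMwithAttachment.py | _merge_continuation
-- ===== SOURCE A (Python) =====
-- def _merge_continuation(base: str, addition: str) -> str:
--     """Return ``base`` with ``addition`` stitched on, avoiding duplicated spans."""
--     if not addition:
--         return base
--     addition = addition.lstrip()
--     if not addition:
--         return base
--     # If the model repeated the entire answer, drop it.
--     if addition.strip().startswith(base.strip()):
--         return base
--     # Find the largest overlap between the end of ``base`` and the beginning of ``addition``.
--     max_overlap = min(len(base), len(addition), 600)
--     for size in range(max_overlap, 0, -1):
--         if base[-size:] == addition[:size]: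
--             return base + addition[size:]
--     # If the continuation is already contained, avoid re-appending.
--     if addition in base:
--         return base
--     return base + ("\n" if base and not base.endswith("\n") else "") + addition
-- ===== SOURCE B (Python) =====
-- def _prefix_function(s):
--     """KMP failure function: pi[i] = length of the longest proper border of s[:i+1]."""
--     pi = [0] * len(s)
--     k = 0
--     for i in range(1, len(s)):
--         while k and s[i] != s[k]:
--             k = pi[k - 1]
--         if s[i] == s[k]:
--             k += 1
--         pi[i] = k
--     return pi
--
--
-- def _merge_continuation(base: str, addition: str) -> str:
--     """Return ``base`` with ``addition`` stitched on, avoiding duplicated spans."""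
--     add = addition.lstrip()
--     if not add:
--         return base
--     # If the model repeated the entire answer, drop it.
--     if add.strip().startswith(base.strip()):
--         return base
--     # Largest overlap between the end of ``base`` and the start of ``add``,
--     # found in one linear KMP scan instead of trying every size.
--     cap = min(len(base), len(add), 600)
--     s = add[:cap]
--     pi = _prefix_function(s)
--     j = 0
--     for c in base[len(base) - cap:]:
--         while j and c != s[j]:
--             j = pi[j - 1]
--         if c == s[j]:
--             j += 1
--     if j:
--         return base + add[j:]
--     # If the continuation is already contained, avoid re-appending.
--     if add in base:
--         return base
--     sep = "" if (not base or base.endswith("\n")) else "\n"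
--     return base + sep + add
-- ===== Notes on version B (the rewrite author's own statement) =====
-- stated objective: alternative
-- what changed: The descending try-every-size overlap loop (compare base[-size:] == addition[:size] for size = cap..1) is replaced by a KMP prefix-function over the capped addition prefix plus a single linear automaton scan of the capped base tail, which yields the largest overlap directly; the surrounding guards and fallback branches are unchanged.
import Mathlib
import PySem

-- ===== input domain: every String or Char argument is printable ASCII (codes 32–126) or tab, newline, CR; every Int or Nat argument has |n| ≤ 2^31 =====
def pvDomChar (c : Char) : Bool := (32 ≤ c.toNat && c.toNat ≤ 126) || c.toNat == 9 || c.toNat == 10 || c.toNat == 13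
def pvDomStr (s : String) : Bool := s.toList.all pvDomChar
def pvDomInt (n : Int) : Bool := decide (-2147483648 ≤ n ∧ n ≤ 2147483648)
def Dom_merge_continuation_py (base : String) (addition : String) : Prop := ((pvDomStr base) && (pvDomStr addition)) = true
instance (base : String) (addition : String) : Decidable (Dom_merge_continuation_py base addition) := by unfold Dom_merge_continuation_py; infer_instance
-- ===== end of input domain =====

-- B replaces A's descending try-every-size overlap loop by a single KMP prefix-function scan
-- over the capped slices (objective: alternative algorithm for the largest-overlap search).

-- ===== PORT A =====
-- the descending `for size in range(max_overlap, 0, -1)` loop with its early return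
def mergeLoopA (b a : List Char) : List Int → Option (List Char)
  | [] => none
  | size :: rest =>
    if PySem.List.slice b (some (-size)) none = PySem.List.slice a none (some size) then
      some (b ++ PySem.List.slice a (some size) none)
    else mergeLoopA b a rest

def merge_continuation_py (base : String) (addition : String) : String :=
  if addition.toList = [] then base
  else
    let addl := PySem.Chars.lstrip addition.toList
    if addl = [] then base
    else if PySem.Chars.startswith (PySem.Chars.strip addl) (PySem.Chars.strip base.toList) = true then base
    else
      let max_overlap : Nat := min (min base.toList.length addl.length) 600
      match mergeLoopA base.toList addl (PySem.List.pyRange (max_overlap : Int) 0 (-1)) with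
      | some r => String.ofList r
      | none =>
        if PySem.Chars.isIn addl base.toList = true then base
        else String.ofList (base.toList ++ (if base.toList ≠ [] ∧ PySem.Chars.endswith base.toList ['\n'] = false then ['\n'] else []) ++ addl)

-- ===== PORT B =====
-- `while k and c != s[k]: k = pi[k-1]` — fuel-bounded (fuel = entry value of k, enough since
-- the chain strictly decreases; the fuel-exhausted branch is a totalization guard only)
def kmpChase (pi : List Nat) (s : List Char) (c : Char) : Nat → Nat → Nat
  | _, 0 => 0
  | 0, _ + 1 => 0
  | fuel + 1, jp + 1 => if c = s.getD (jp + 1) default then jp + 1 else kmpChase pi s c fuel (pi.getD jp 0)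

-- one automaton step: the chase followed by `if c == s[k]: k += 1`
def kmpStep (pi : List Nat) (s : List Char) (j : Nat) (c : Char) : Nat :=
  let e := kmpChase pi s c j j
  if c = s.getD e default then e + 1 else e

-- `_prefix_function(s)` (pi built left to right; `pi = [0]*len(s)` + fill = append here)
def prefixFunction (s : List Char) : List Nat :=
  if s.length = 0 then []
  else ((PySem.List.pyRange 1 (s.length : Int) 1).foldl
    (fun st i =>
      let k := kmpStep st.1 s st.2 (PySem.List.pyGetD s i default)
      (st.1 ++ [k], k)) ([0], 0)).1

def merge_continuation_py_alt (base : String) (addition : String) : String :=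
  let addl := PySem.Chars.lstrip addition.toList
  if addl = [] then base
  else if PySem.Chars.startswith (PySem.Chars.strip addl) (PySem.Chars.strip base.toList) = true then base
  else
    let cap : Nat := min (min base.toList.length addl.length) 600
    let s := PySem.List.slice addl none (some (cap : Int))
    let pi := prefixFunction s
    let j := (PySem.List.slice base.toList (some ((base.toList.length : Int) - (cap : Int))) none).foldl
      (fun j c => kmpStep pi s j c) 0
    if j ≠ 0 then String.ofList (base.toList ++ PySem.List.slice addl (some (j : Int)) none)
    else if PySem.Chars.isIn addl base.toList = true then base
    else String.ofList (base.toList ++ (if base.toList = [] ∨ PySem.Chars.endswith base.toList ['\n'] = true then [] else ['\n']) ++ addl)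

-- ===== PRECONDITION & SPEC =====
def Spec_merge_continuation_py (base : String) (addition : String) (out : String) : Prop := out = merge_continuation_py_alt base addition
instance (base : String) (addition : String) (out : String) : Decidable (Spec_merge_continuation_py base addition out) := by unfold Spec_merge_continuation_py; infer_instance

-- ===== CLAIM (what is proved, stated in full; the proofs are below) =====
def Claim_equal_merge_continuation_py : Prop := ∀ (base : String) (addition : String), Dom_merge_continuation_py base addition → Spec_merge_continuation_py base addition (merge_continuation_py base addition)

-- ===== LEMMAS AND PROOFS =====

-- greatest k ≤ |S| such that S.take k is a suffix of T (the overlap both loops look for)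
def ovFG (S T : List Char) : Nat := Nat.findGreatest (fun k => S.take k <:+ T) S.length

-- greatest proper border length of S.take i (the value _prefix_function stores at index i-1)
def ovFb (S : List Char) (i : Nat) : Nat := Nat.findGreatest (fun k => k < i ∧ S.take k <:+ S.take i) i

theorem suffix_concat_iff (u t : List Char) (x c : Char) :
    (u ++ [x] <:+ t ++ [c]) ↔ (u <:+ t ∧ x = c) := by
  rw [← List.reverse_prefix]
  simp only [List.reverse_append, List.reverse_cons, List.reverse_nil, List.nil_append,
    List.singleton_append, List.cons_prefix_cons, List.reverse_prefix]
  tauto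

theorem take_ext_iff (S T : List Char) (c : Char) (l : Nat) (hl : l < S.length) :
    S.take (l + 1) <:+ T ++ [c] ↔ (S.take l <:+ T ∧ S.getD l default = c) := by
  rw [List.take_succ_eq_append_getElem hl, suffix_concat_iff, List.getD_eq_getElem _ _ hl]

theorem take_suffix_take (S T : List Char) {k j : Nat} (hk : k ≤ j) (_hj : j ≤ S.length)
    (h1 : S.take k <:+ T) (h2 : S.take j <:+ T) : S.take k <:+ S.take j := by
  apply List.suffix_of_suffix_length_le h1 h2
  simp [List.length_take]; omega

theorem ovFb_lt (S : List Char) (i : Nat) (hi : 0 < i) : ovFb S i < i := by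
  unfold ovFb
  exact (Nat.findGreatest_spec (P := fun k => k < i ∧ S.take k <:+ S.take i) (m := 0) (Nat.zero_le _) ⟨hi, by simp⟩).1

theorem ovFb_suffix (S : List Char) (i : Nat) (hi : 0 < i) :
    S.take (ovFb S i) <:+ S.take i :=
  (Nat.findGreatest_spec (P := fun k => k < i ∧ S.take k <:+ S.take i) (m := 0) (Nat.zero_le _) ⟨hi, by simp⟩).2

theorem ovFb_is_greatest (S : List Char) {i k : Nat} (hk : k < i) (h : S.take k <:+ S.take i) :
    k ≤ ovFb S i :=
  Nat.le_findGreatest (Nat.le_of_lt hk) ⟨hk, h⟩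

theorem ovFG_suffix (S T : List Char) : S.take (ovFG S T) <:+ T :=
  Nat.findGreatest_spec (P := fun k => S.take k <:+ T) (m := 0) (Nat.zero_le _) (by simp)

theorem ovFG_is_greatest (S T : List Char) {k : Nat} (hk : k ≤ S.length) (h : S.take k <:+ T) :
    k ≤ ovFG S T :=
  Nat.le_findGreatest hk h

theorem ovFG_le (S T : List Char) : ovFG S T ≤ S.length := Nat.findGreatest_le _

theorem kmpChase_spec (S T : List Char) (pi : List Nat) (c : Char) :
    ∀ fuel j, j ≤ fuel → j ≤ S.length → S.take j <:+ T →
    (∀ i, i + 1 ≤ j → pi.getD i 0 = ovFb S (i + 1)) →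
    (kmpChase pi S c fuel j ≤ j ∧ S.take (kmpChase pi S c fuel j) <:+ T ∧
      (kmpChase pi S c fuel j = 0 ∨ c = S.getD (kmpChase pi S c fuel j) default) ∧
      ∀ k, k ≤ j → S.take k <:+ T → c = S.getD k default → k ≤ kmpChase pi S c fuel j) := by
  have h0 : ∀ fu, kmpChase pi S c fu 0 = 0 := fun fu => by cases fu <;> rfl
  intro fuel
  induction fuel with
  | zero =>
    intro j hle _ _ _
    have hj : j = 0 := Nat.le_zero.mp hle
    subst hj
    rw [h0]
    exact ⟨le_rfl, by simp, Or.inl rfl, fun k hk _ _ => hk⟩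
  | succ f ih =>
    intro j hle hlen hsuf hpi
    match j with
    | 0 =>
      rw [h0]
      exact ⟨le_rfl, by simp, Or.inl rfl, fun k hk _ _ => hk⟩
    | jp + 1 =>
      by_cases hc : c = S.getD (jp + 1) default
      · have hval : kmpChase pi S c (f + 1) (jp + 1) = jp + 1 := by
          simp only [kmpChase, if_pos hc]
        rw [hval]
        exact ⟨le_rfl, hsuf, Or.inr hc, fun k hk _ _ => hk⟩
      · have hval : kmpChase pi S c (f + 1) (jp + 1) = kmpChase pi S c f (pi.getD jp 0) := by
          simp only [kmpChase, if_neg hc]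
        have hpig : pi.getD jp 0 = ovFb S (jp + 1) := hpi jp le_rfl
        have hlt : ovFb S (jp + 1) < jp + 1 := ovFb_lt S (jp + 1) (Nat.succ_pos _)
        have hsuf2 : S.take (ovFb S (jp + 1)) <:+ T :=
          (ovFb_suffix S (jp + 1) (Nat.succ_pos _)).trans hsuf
        have hres := ih (pi.getD jp 0) (by omega) (by rw [hpig]; omega)
          (by rw [hpig]; exact hsuf2) (fun i hi => hpi i (by omega))
        rw [hval]
        refine ⟨by omega, hres.2.1, hres.2.2.1, ?_⟩
        intro k hk hks hkc
        rcases Nat.lt_or_ge k (jp + 1) with hklt | hkge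
        · have htt : S.take k <:+ S.take (jp + 1) :=
            take_suffix_take S T (by omega) hlen hks hsuf
          have : k ≤ ovFb S (jp + 1) := ovFb_is_greatest S hklt htt
          exact hres.2.2.2 k (by omega) hks hkc
        · have hkj : k = jp + 1 := by omega
          subst hkj
          exact absurd hkc hc

theorem kmpStep_matcher (S T : List Char) (pi : List Nat) (c : Char) (j : Nat)
    (hT : T.length < S.length)
    (hpi : ∀ i, i + 1 ≤ j → pi.getD i 0 = ovFb S (i + 1))
    (hj : j = ovFG S T) (hjT : j ≤ T.length) :
    kmpStep pi S j c = ovFG S (T ++ [c]) ∧ kmpStep pi S j c ≤ T.length + 1 := by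
  subst hj
  have hsuf : S.take (ovFG S T) <:+ T := ovFG_suffix S T
  have hle : ovFG S T ≤ S.length := ovFG_le S T
  have hch := kmpChase_spec S T pi c (ovFG S T) (ovFG S T) le_rfl hle hsuf hpi
  simp only [kmpStep]
  set e := kmpChase pi S c (ovFG S T) (ovFG S T) with he
  by_cases hc : c = S.getD e default
  · rw [if_pos hc]
    have heS : e < S.length := lt_of_le_of_lt (le_trans hch.1 hjT) hT
    have hm : S.take (e + 1) <:+ T ++ [c] := (take_ext_iff S T c e heS).mpr ⟨hch.2.1, hc.symm⟩
    refine ⟨le_antisymm (ovFG_is_greatest S (T ++ [c]) (by omega) hm) ?_, by omega⟩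
    rcases Nat.eq_zero_or_pos (ovFG S (T ++ [c])) with h0 | hpos
    · omega
    · obtain ⟨l, hl⟩ : ∃ l, ovFG S (T ++ [c]) = l + 1 := ⟨ovFG S (T ++ [c]) - 1, by omega⟩
      have hgs : S.take (ovFG S (T ++ [c])) <:+ T ++ [c] := ovFG_suffix S (T ++ [c])
      have hglen : ovFG S (T ++ [c]) ≤ S.length := ovFG_le S _
      rw [hl] at hgs hglen
      have hext := (take_ext_iff S T c l (by omega)).mp hgs
      have hlj : l ≤ ovFG S T := ovFG_is_greatest S T (by omega) hext.1
      have : l ≤ e := hch.2.2.2 l hlj hext.1 hext.2.symm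
      omega
  · rw [if_neg hc]
    have he0 : e = 0 := by
      rcases hch.2.2.1 with h | h
      · exact h
      · exact absurd h hc
    refine ⟨?_, by omega⟩
    rw [he0]
    symm
    unfold ovFG
    rw [Nat.findGreatest_eq_zero_iff]
    intro n hn hnle hP
    obtain ⟨l, hl⟩ : ∃ l, n = l + 1 := ⟨n - 1, by omega⟩
    subst hl
    have hext := (take_ext_iff S T c l (by omega)).mp hP
    have hlj : l ≤ ovFG S T := ovFG_is_greatest S T (by omega) hext.1
    have hle' : l ≤ e := hch.2.2.2 l hlj hext.1 hext.2.symm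
    have hl0 : l = 0 := by omega
    subst hl0
    rw [he0] at hc
    exact hc hext.2.symm

theorem kmpStep_pi (S : List Char) (pi : List Nat) (i : Nat) (hi : 0 < i) (hiS : i < S.length)
    (hpi : ∀ i', i' + 1 ≤ ovFb S i → pi.getD i' 0 = ovFb S (i' + 1)) :
    kmpStep pi S (ovFb S i) (S.getD i default) = ovFb S (i + 1) := by
  have hflt : ovFb S i < i := ovFb_lt S i hi
  have hsuf : S.take (ovFb S i) <:+ S.take i := ovFb_suffix S i hi
  have hch := kmpChase_spec S (S.take i) pi (S.getD i default) (ovFb S i) (ovFb S i)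
    le_rfl (by omega) hsuf hpi
  have htk : S.take (i + 1) = S.take i ++ [S.getD i default] := by
    rw [List.take_succ_eq_append_getElem hiS, List.getD_eq_getElem _ _ hiS]
  simp only [kmpStep]
  set e := kmpChase pi S (S.getD i default) (ovFb S i) (ovFb S i) with he
  by_cases hc : S.getD i default = S.getD e default
  · rw [if_pos hc]
    have heS : e < S.length := by have := hch.1; omega
    have hm : S.take (e + 1) <:+ S.take (i + 1) := by
      rw [htk]
      exact (take_ext_iff S (S.take i) (S.getD i default) e heS).mpr ⟨hch.2.1, hc.symm⟩
    apply le_antisymm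
    · exact ovFb_is_greatest S (by have := hch.1; omega) hm
    · rcases Nat.eq_zero_or_pos (ovFb S (i + 1)) with h0 | hpos
      · omega
      · obtain ⟨l, hl⟩ : ∃ l, ovFb S (i + 1) = l + 1 := ⟨ovFb S (i + 1) - 1, by omega⟩
        have hglt : ovFb S (i + 1) < i + 1 := ovFb_lt S (i + 1) (by omega)
        have hgs : S.take (ovFb S (i + 1)) <:+ S.take (i + 1) := ovFb_suffix S (i + 1) (by omega)
        rw [hl] at hgs hglt
        rw [htk] at hgs
        have hext := (take_ext_iff S (S.take i) (S.getD i default) l (by omega)).mp hgs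
        have hlj : l ≤ ovFb S i := ovFb_is_greatest S (by omega) hext.1
        have : l ≤ e := hch.2.2.2 l hlj hext.1 hext.2.symm
        omega
  · rw [if_neg hc]
    have he0 : e = 0 := by
      rcases hch.2.2.1 with h | h
      · exact h
      · exact absurd h hc
    rw [he0]
    symm
    unfold ovFb
    rw [Nat.findGreatest_eq_zero_iff]
    intro n hn0 hni hP
    obtain ⟨l, hl⟩ : ∃ l, n = l + 1 := ⟨n - 1, by omega⟩
    subst hl
    have hgs := hP.2
    rw [htk] at hgs
    have hext := (take_ext_iff S (S.take i) (S.getD i default) l (by omega)).mp hgs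
    have hlj : l ≤ ovFb S i := ovFb_is_greatest S (by omega) hext.1
    have hle' : l ≤ e := hch.2.2.2 l hlj hext.1 hext.2.symm
    have hl0 : l = 0 := by omega
    subst hl0
    rw [he0] at hc
    exact hc hext.2.symm

theorem getD_append_length (l : List Nat) (k : Nat) : (l ++ [k]).getD l.length 0 = k := by
  simp [List.getD]

theorem ovFb_one (S : List Char) : ovFb S 1 = 0 := by
  unfold ovFb
  rw [Nat.findGreatest_eq_zero_iff]
  intro n hn0 hn1 hP
  omega

theorem piFold_inv (S : List Char) : ∀ r, 1 ≤ r → r ≤ S.length →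
    (((PySem.List.pyRange 1 (r : Int) 1).foldl
      (fun st i =>
        let k := kmpStep st.1 S st.2 (PySem.List.pyGetD S i default)
        (st.1 ++ [k], k)) ([0], 0)).1.length = r ∧
     (∀ i, i < r → ((PySem.List.pyRange 1 (r : Int) 1).foldl
      (fun st i =>
        let k := kmpStep st.1 S st.2 (PySem.List.pyGetD S i default)
        (st.1 ++ [k], k)) ([0], 0)).1.getD i 0 = ovFb S (i + 1)) ∧
     ((PySem.List.pyRange 1 (r : Int) 1).foldl
      (fun st i =>
        let k := kmpStep st.1 S st.2 (PySem.List.pyGetD S i default)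
        (st.1 ++ [k], k)) ([0], 0)).2 = ovFb S r) := by
  intro r
  induction r with
  | zero => omega
  | succ r ih =>
    intro _ hr1
    rcases Nat.eq_zero_or_pos r with hr0 | hrpos
    · subst hr0
      have hnil : PySem.List.pyRange 1 ((0 + 1 : Nat) : Int) 1 = [] :=
        PySem.List.pyRange_one_eq_nil (by norm_num)
      rw [hnil]
      refine ⟨rfl, ?_, by simpa using (ovFb_one S).symm⟩
      intro i hi
      have : i = 0 := by omega
      subst this
      simpa using (ovFb_one S).symm
    · have ihh := ih hrpos (by omega)
      have hsplit : PySem.List.pyRange 1 ((r + 1 : Nat) : Int) 1 =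
          PySem.List.pyRange 1 (r : Int) 1 ++ [(r : Int)] := by
        have : ((r + 1 : Nat) : Int) = (r : Int) + 1 := by push_cast; ring
        rw [this]
        exact PySem.List.pyRange_one_succ_right (by exact_mod_cast hrpos)
      rw [hsplit, List.foldl_append]
      set st := (PySem.List.pyRange 1 (r : Int) 1).foldl
        (fun st i =>
          let k := kmpStep st.1 S st.2 (PySem.List.pyGetD S i default)
          (st.1 ++ [k], k)) ([0], 0) with hst
      simp only [List.foldl_cons, List.foldl_nil]
      have hlen1 : st.1.length = r := ihh.1
      have hget : PySem.List.pyGetD S (r : Int) default = S.getD r default :=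
        PySem.List.pyGetD_natCast S r default
      have hk : kmpStep st.1 S st.2 (PySem.List.pyGetD S (r : Int) default) = ovFb S (r + 1) := by
        rw [hget, ihh.2.2]
        exact kmpStep_pi S st.1 r hrpos (by omega)
          (fun i' hi' => ihh.2.1 i' (by have := ovFb_lt S r hrpos; omega))
      refine ⟨by simp [hlen1], ?_, hk⟩
      intro i hi
      rcases Nat.lt_or_ge i r with hilt | hige
      · rw [List.getD_append _ _ _ i (by rw [hlen1]; exact hilt)]
        exact ihh.2.1 i hilt
      · have hir : i = r := by omega
        subst hir
        have hgl := getD_append_length st.1 (kmpStep st.1 S st.2 (PySem.List.pyGetD S (i : Int) default))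
        rw [hlen1] at hgl
        rw [hgl, hk]

theorem prefixFunction_spec (S : List Char) :
    ∀ i, i + 1 ≤ S.length → (prefixFunction S).getD i 0 = ovFb S (i + 1) := by
  intro i hi
  unfold prefixFunction
  rw [if_neg (by omega)]
  exact (piFold_inv S S.length (by omega) le_rfl).2.1 i (by omega)

theorem matcher_spec (S : List Char) (pi : List Nat)
    (hpi : ∀ i, i + 1 ≤ S.length → pi.getD i 0 = ovFb S (i + 1)) :
    ∀ T : List Char, T.length ≤ S.length →
      T.foldl (fun j c => kmpStep pi S j c) 0 = ovFG S T ∧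
      T.foldl (fun j c => kmpStep pi S j c) 0 ≤ T.length := by
  intro T
  induction T using List.reverseRecOn with
  | nil =>
    intro _
    simp only [List.foldl_nil, List.length_nil]
    constructor
    · symm
      unfold ovFG
      rw [Nat.findGreatest_eq_zero_iff]
      intro n hn0 hnS hsuf
      have := List.suffix_nil.mp hsuf
      have hlen : (S.take n).length = n := by simp [List.length_take]; omega
      rw [this] at hlen
      simp at hlen
      omega
    · omega
  | append_singleton T c ih =>
    intro hlen
    have hT : T.length < S.length := by simp at hlen; omega
    have ihh := ih (by omega)
    rw [List.foldl_append, List.foldl_cons, List.foldl_nil]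
    have hstep := kmpStep_matcher S T pi c (T.foldl (fun j c => kmpStep pi S j c) 0) hT
      (fun i hi => hpi i (by omega)) ihh.1 ihh.2
    refine ⟨hstep.1, ?_⟩
    have := hstep.2
    simp only [List.length_append, List.length_cons, List.length_nil]
    omega

theorem mergeLoopA_spec (b a : List Char) (r : Nat) :
    mergeLoopA b a (PySem.List.pyRange (r : Int) 0 (-1)) =
      (if Nat.findGreatest (fun k => b.drop (b.length - k) = a.take k) r = 0 then none
       else some (b ++ a.drop (Nat.findGreatest (fun k => b.drop (b.length - k) = a.take k) r))) := by
  induction r with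
  | zero =>
    rw [Nat.cast_zero, PySem.List.pyRange_neg_one_eq_nil le_rfl]
    simp [mergeLoopA]
  | succ r ih =>
    have hcast : ((r + 1 : Nat) : Int) = (r : Int) + 1 := by push_cast; ring
    rw [hcast, PySem.List.pyRange_neg_one_cons (by positivity)]
    have hback : (r : Int) + 1 - 1 = (r : Int) := by ring
    rw [hback]
    have hcond : PySem.List.slice b (some (-((r : Int) + 1))) none = b.drop (b.length - (r + 1)) := by
      rw [← hcast]
      exact PySem.List.slice_from_neg_natCast b (r + 1) (by omega)
    have hto : PySem.List.slice a none (some ((r : Int) + 1)) = a.take (r + 1) := by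
      rw [← hcast]
      exact PySem.List.slice_to_natCast a (r + 1)
    have hfrom : PySem.List.slice a (some ((r : Int) + 1)) none = a.drop (r + 1) := by
      rw [← hcast]
      exact PySem.List.slice_from_natCast a (r + 1)
    simp only [mergeLoopA, hcond, hto, hfrom]
    rw [Nat.findGreatest_succ]
    by_cases hp : b.drop (b.length - (r + 1)) = a.take (r + 1)
    · rw [if_pos hp, if_pos hp, if_neg (by omega)]
    · rw [if_neg hp, ih]
      simp only [if_neg hp]

theorem findGreatest_congr (P Q : Nat → Prop) [DecidablePred P] [DecidablePred Q] (n : Nat)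
    (h : ∀ k, k ≤ n → (P k ↔ Q k)) : Nat.findGreatest P n = Nat.findGreatest Q n := by
  induction n with
  | zero => rfl
  | succ n ih =>
    rw [Nat.findGreatest_succ, Nat.findGreatest_succ, ih (fun k hk => h k (Nat.le_succ_of_le hk))]
    by_cases hp : P (n + 1)
    · rw [if_pos hp, if_pos ((h (n + 1) le_rfl).mp hp)]
    · rw [if_neg hp, if_neg (fun hq => hp ((h (n + 1) le_rfl).mpr hq))]

-- ===== VERDICT (by name: the statement is the Claim_ definition above) =====
theorem merge_continuation_py_spec : Claim_equal_merge_continuation_py := by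
  unfold Claim_equal_merge_continuation_py
  intro base addition _
  unfold Spec_merge_continuation_py
  by_cases h1 : addition.toList = []
  · simp [merge_continuation_py, merge_continuation_py_alt, h1,
      show PySem.Chars.lstrip ([] : List Char) = [] from rfl]
  simp only [merge_continuation_py, merge_continuation_py_alt, if_neg h1]
  by_cases h2 : PySem.Chars.lstrip addition.toList = []
  · simp [h2]
  by_cases h3 : PySem.Chars.startswith (PySem.Chars.strip (PySem.Chars.lstrip addition.toList))
      (PySem.Chars.strip base.toList) = true
  · simp [h2, h3]
  simp only [if_neg h2, if_neg h3]
  set B := base.toList with hB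
  set a := PySem.Chars.lstrip addition.toList with ha
  set cap := min (min B.length a.length) 600 with hcap
  have hcapB : cap ≤ B.length := by omega
  have hcapa : cap ≤ a.length := by omega
  set S := PySem.List.slice a none (some (cap : Int)) with hSdef
  set T := PySem.List.slice B (some ((B.length : Int) - (cap : Int))) none with hTdef
  have hS : S = a.take cap := PySem.List.slice_to_natCast a cap
  have hSlen : S.length = cap := by rw [hS]; simp [List.length_take]; omega
  have hT : T = B.drop (B.length - cap) := by
    rw [hTdef, PySem.List.slice_from B (by omega)]
    congr 1
    omega
  have hTlen : T.length = cap := by rw [hT]; simp [List.length_drop]; omega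
  have hpi := prefixFunction_spec S
  have hmatch := matcher_spec S (prefixFunction S) hpi T (by omega)
  have hpred : ∀ k, k ≤ cap →
      ((fun k => S.take k <:+ T) k ↔ (fun k => B.drop (B.length - k) = a.take k) k) := by
    intro k hk
    simp only []
    have htk : S.take k = a.take k := by
      rw [hS, List.take_take, min_eq_left hk]
    have hlentk : (a.take k).length = k := by simp [List.length_take]; omega
    rw [List.suffix_iff_eq_drop, htk, hlentk, hTlen, hT, List.drop_drop]
    have harith : B.length - cap + (cap - k) = B.length - k := by omega
    rw [harith]
    exact eq_comm
  have hfg : ovFG S T = Nat.findGreatest (fun k => B.drop (B.length - k) = a.take k) cap := by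
    unfold ovFG
    rw [hSlen]
    exact findGreatest_congr _ _ cap hpred
  rw [mergeLoopA_spec B a cap, hmatch.1, hfg]
  set g := Nat.findGreatest (fun k => B.drop (B.length - k) = a.take k) cap with hg
  by_cases hg0 : g = 0
  · rw [if_pos hg0]
    simp only [hg0, ne_eq, not_true_eq_false, if_false]
    by_cases h4 : PySem.Chars.isIn a B = true
    · simp [h4]
    · simp only [if_neg h4]
      have hsep : (if B ≠ [] ∧ PySem.Chars.endswith B ['\n'] = false then ['\n'] else []) =
          (if B = [] ∨ PySem.Chars.endswith B ['\n'] = true then ([] : List Char) else ['\n']) := by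
        by_cases hb : B = [] <;> by_cases he : PySem.Chars.endswith B ['\n'] = true <;>
          simp [hb, he]
      rw [hsep]
  · rw [if_neg hg0]
    simp only [ne_eq, hg0, not_false_eq_true, if_true]
    rw [PySem.List.slice_from_natCast a g]
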